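-- pv_equiv track=rewrite | github.com/kmrsandeep1998/ToonPrompt | src/toonprompt/plugins.py | is_trusted_module
-- ===== SOURCE A (Python) =====
-- def is_trusted_module(module_path: str, trusted_prefixes: list[str]) -> bool:
--     normalized = module_path.strip()
--     if not normalized:
--         return False
--     return any(
--         normalized == prefix or normalized.startswith(f"{prefix}.")
--         for prefix in trusted_prefixes
--         if isinstance(prefix, str) and prefix.strip()
--     )
-- ===== SOURCE B (Python) =====
-- def is_trusted_module(module_path: str, trusted_prefixes: list[str]) -> bool:
--     normalized = module_path.strip()
--     if not normalized:
--         return False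
--     ancestors = {normalized[:i] for i, ch in enumerate(normalized) if ch == '.'}
--     ancestors.add(normalized)
--     trusted = {p for p in trusted_prefixes if isinstance(p, str) and p.strip()}
--     return not ancestors.isdisjoint(trusted)
-- ===== Notes on version B (the rewrite author's own statement) =====
-- stated objective: alternative
-- what changed: Instead of scanning the prefix list and testing equality/startswith per prefix, B builds the set of dot-delimited ancestors of the stripped path plus the set of non-blank trusted prefixes and returns whether the two sets intersect.
import Mathlib
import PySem

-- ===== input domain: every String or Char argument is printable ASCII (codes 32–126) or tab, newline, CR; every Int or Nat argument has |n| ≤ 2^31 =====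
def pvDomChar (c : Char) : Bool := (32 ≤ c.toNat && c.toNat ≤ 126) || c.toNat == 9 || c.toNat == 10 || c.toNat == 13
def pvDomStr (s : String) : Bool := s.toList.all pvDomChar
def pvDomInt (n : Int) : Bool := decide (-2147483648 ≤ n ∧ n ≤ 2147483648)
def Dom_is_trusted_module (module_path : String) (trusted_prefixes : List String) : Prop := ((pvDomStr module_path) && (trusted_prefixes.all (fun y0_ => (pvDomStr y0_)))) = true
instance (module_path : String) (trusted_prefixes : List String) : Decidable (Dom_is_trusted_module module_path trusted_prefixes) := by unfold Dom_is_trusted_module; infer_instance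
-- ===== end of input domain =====

-- B replaces A's scan of the prefix list (startswith per prefix) by building the set of
-- dot-delimited ancestors of the stripped path and intersecting it with the trusted set (objective: alternative).


-- ===== PORT A =====
def is_trusted_module (module_path : String) (trusted_prefixes : List String) : Bool :=
  let normalized := PySem.Str.strip module_path
  if normalized == "" then false
  else trusted_prefixes.any (fun pfx =>
    (PySem.Str.strip pfx != "") &&
    (normalized == pfx || PySem.Str.startswith normalized (pfx ++ ".")))

-- ===== PORT B =====
def is_trusted_module_alt (module_path : String) (trusted_prefixes : List String) : Bool :=
  let normalized := PySem.Str.strip module_path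
  if normalized == "" then false
  else
    let ancestors := PySem.Set.add
      (PySem.Set.ofList (((PySem.List.enumerate normalized.toList).filter (fun p => p.2 == '.')).map
        (fun p => PySem.Str.slice normalized none (some p.1))))
      normalized
    let trusted := PySem.Set.ofList (trusted_prefixes.filter (fun p => PySem.Str.strip p != ""))
    !(PySem.Set.isdisjoint ancestors trusted)

-- ===== PRECONDITION & SPEC =====
def Spec_is_trusted_module (module_path : String) (trusted_prefixes : List String) (out : Bool) : Prop := out = is_trusted_module_alt module_path trusted_prefixes
instance (module_path : String) (trusted_prefixes : List String) (out : Bool) : Decidable (Spec_is_trusted_module module_path trusted_prefixes out) := by unfold Spec_is_trusted_module; infer_instance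

-- ===== CLAIM (what is proved, stated in full; the proofs are below) =====
def Claim_equal_is_trusted_module : Prop := ∀ (module_path : String) (trusted_prefixes : List String), Dom_is_trusted_module module_path trusted_prefixes → Spec_is_trusted_module module_path trusted_prefixes (is_trusted_module module_path trusted_prefixes)

-- ===== LEMMAS AND PROOFS =====

-- `q ++ ['.']` is a prefix of `l` exactly when `q` is the truncation of `l` at some '.'.
lemma prefix_dot_iff (q l : List Char) :
    (q ++ ['.']) <+: l ↔ ∃ k, ∃ _ : k < l.length, l[k] = '.' ∧ q = l.take k := by
  constructor
  · rintro ⟨r, hr⟩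
    refine ⟨q.length, ?_, ?_, ?_⟩ <;> subst hr <;> simp
  · rintro ⟨k, hk, hd, rfl⟩
    refine ⟨l.drop (k + 1), ?_⟩
    rw [List.append_assoc, List.singleton_append, ← hd, List.getElem_cons_drop,
      List.take_append_drop]

-- A's per-prefix test characterised through B's ancestor set.
lemma match_iff (n p : String) :
    (n == p || PySem.Str.startswith n (p ++ ".")) = true ↔
      p = n ∨ ∃ k, ∃ _ : k < n.toList.length, n.toList[k] = '.' ∧ p.toList = n.toList.take k := by
  have hsw : PySem.Str.startswith n (p ++ ".") = true ↔ (p.toList ++ ['.']) <+: n.toList := by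
    rw [PySem.Str.startswith_eq, PySem.Chars.startswith_iff]
    simp
  rw [Bool.or_eq_true, beq_iff_eq, hsw, prefix_dot_iff]
  constructor
  · rintro (rfl | h)
    · exact Or.inl rfl
    · exact Or.inr h
  · rintro (rfl | h)
    · exact Or.inl rfl
    · exact Or.inr h

lemma toList_inj {s t : String} (h : s.toList = t.toList) : s = t :=
  String.toList_inj.mp h

theorem is_trusted_module_spec' (module_path : String) (trusted_prefixes : List String) :
    is_trusted_module module_path trusted_prefixes
      = is_trusted_module_alt module_path trusted_prefixes := by
  unfold is_trusted_module is_trusted_module_alt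
  set n := PySem.Str.strip module_path with hn
  by_cases h0 : n == ""
  · simp [h0]
  · simp only [h0, Bool.false_eq_true, if_false]
    rw [Bool.eq_iff_iff, Bool.not_eq_true', Bool.eq_false_iff, ne_eq,
      PySem.Set.isdisjoint_iff]
    push_neg
    constructor
    · intro hA
      rw [List.any_eq_true] at hA
      obtain ⟨p, hp, hcond⟩ := hA
      rw [Bool.and_eq_true] at hcond
      obtain ⟨hkeep, hmatch⟩ := hcond
      rw [match_iff] at hmatch
      refine ⟨p, ?_, ?_⟩
      · rw [PySem.Set.mem_add]
        rcases hmatch with rfl | ⟨k, hk, hdot, htake⟩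
        · exact Or.inr rfl
        · refine Or.inl ?_
          rw [PySem.Set.mem_ofList, List.mem_map]
          refine ⟨((k : Int), n.toList[k]), ?_, ?_⟩
          · rw [List.mem_filter]
            constructor
            · rw [PySem.List.mem_enumerate_iff]
              exact ⟨k, hk, by simp⟩
            · simp [hdot]
          · apply toList_inj
            rw [htake]
            simp [PySem.Str.slice, PySem.List.slice_to_natCast]
      · rw [PySem.Set.mem_ofList, List.mem_filter]
        exact ⟨hp, hkeep⟩
    · intro hB
      obtain ⟨x, hxa, hxt⟩ := hB
      rw [PySem.Set.mem_ofList, List.mem_filter] at hxt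
      obtain ⟨hxtp, hkeep⟩ := hxt
      rw [List.any_eq_true]
      refine ⟨x, hxtp, ?_⟩
      rw [Bool.and_eq_true]
      refine ⟨hkeep, ?_⟩
      rw [match_iff]
      rw [PySem.Set.mem_add] at hxa
      rcases hxa with hxa | rfl
      · rw [PySem.Set.mem_ofList, List.mem_map] at hxa
        obtain ⟨⟨i, c⟩, hmem, hx⟩ := hxa
        rw [List.mem_filter] at hmem
        obtain ⟨henum, hdot⟩ := hmem
        rw [PySem.List.mem_enumerate_iff] at henum
        obtain ⟨k, hk, hpair⟩ := henum
        refine Or.inr ⟨k, hk, ?_, ?_⟩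
        · have : c = n.toList[k] := by simpa using congrArg Prod.snd hpair
          simp only [beq_iff_eq] at hdot
          rw [← this]; exact hdot
        · have hi : i = (k : Int) := by simpa using congrArg Prod.fst hpair
          subst hx hi
          simp [PySem.Str.slice, PySem.List.slice_to_natCast]
      · exact Or.inl rfl

-- ===== VERDICT (by name: the statement is the Claim_ definition above) =====
theorem is_trusted_module_spec : Claim_equal_is_trusted_module := by
  intro module_path trusted_prefixes _
  exact is_trusted_module_spec' module_path trusted_prefixes
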